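-- pv_equiv track=rewrite | github.com/sujalrawat-arch/md-converter-feature | pdf_extractor/steps/unify.py | _rows_to_grid
-- ===== SOURCE A (Python) =====
-- from typing import Dict, List, Any
--
-- def _rows_to_grid(rows: Dict[int, Dict[int, str]]) -> List[List[str]]:
--     """Flattens the dictionary map into a standard 2D list (grid)."""
--     if not rows:
--         return []
--     sorted_row_indices = sorted(rows.keys())
--     max_cols = max((max(row.keys(), default=0) for row in rows.values()), default=0)
--     if max_cols == 0:
--         return []
--     grid: List[List[str]] = []
--     for row_idx in sorted_row_indices:
--         row_data = rows.get(row_idx, {})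
--         # Fill empty cells to ensure a rectangular grid
--         grid.append([row_data.get(c, "") for c in range(1, max_cols + 1)])
--     return grid
-- ===== SOURCE B (Python) =====
-- from typing import Dict, List
--
--
-- def _row_width(row: Dict[int, str]) -> int:
--     """Largest column key stored in a row (0 for an empty row)."""
--     return max(row, default=0)
--
--
-- def _scatter_row(row: Dict[int, str], max_cols: int) -> List[str]:
--     """Scatter the stored cells of one row into a blank row of max_cols cells."""
--     out = [""] * max_cols  # a negative max_cols gives an empty row, like range() in A
--     for c, v in row.items():
--         if 1 <= c <= max_cols:
--             out[c - 1] = v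
--     return out
--
--
-- def _rows_to_grid(rows: Dict[int, Dict[int, str]]) -> List[List[str]]:
--     """Flattens the dictionary map into a standard 2D list (grid).
--
--     Sorts the (index, row) items once and scatters each row's stored cells into a
--     pre-filled blank row, instead of sorting the keys, re-fetching each row and
--     probing it with .get for every column position."""
--     items = sorted(rows.items(), key=lambda kv: kv[0])
--     if not items:
--         return []
--     max_cols = max(_row_width(row) for _, row in items)
--     if max_cols == 0:
--         return []
--     return [_scatter_row(row, max_cols) for _, row in items]
-- ===== Notes on version B (the rewrite author's own statement) =====
-- stated objective: alternative
-- what changed: B sorts the (index, row) items once and maps a scatter helper over them, writing each stored (col, value) into a pre-filled blank row, instead of sorting the keys, re-fetching each row from the dict and probing it with .get for every column in range(1, max_cols+1).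
import Mathlib
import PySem

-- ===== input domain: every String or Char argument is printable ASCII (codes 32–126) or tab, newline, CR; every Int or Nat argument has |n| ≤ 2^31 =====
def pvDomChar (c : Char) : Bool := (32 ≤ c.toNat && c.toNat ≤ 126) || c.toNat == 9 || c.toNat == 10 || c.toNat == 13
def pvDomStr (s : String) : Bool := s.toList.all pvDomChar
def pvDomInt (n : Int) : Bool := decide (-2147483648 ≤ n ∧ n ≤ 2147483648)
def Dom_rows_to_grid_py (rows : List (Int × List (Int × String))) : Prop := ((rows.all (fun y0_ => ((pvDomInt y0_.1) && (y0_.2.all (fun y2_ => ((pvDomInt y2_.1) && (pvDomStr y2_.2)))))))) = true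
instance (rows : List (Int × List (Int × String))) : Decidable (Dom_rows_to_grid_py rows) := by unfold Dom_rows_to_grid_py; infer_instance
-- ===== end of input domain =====

-- B sorts the (index, row) items once and maps a scatter helper over them (stored cells
-- written into a pre-filled blank row), instead of sorting the keys, re-fetching each
-- row and probing it with .get per column; same asymptotic cost, different decomposition.

-- ===== PORT A =====
def rows_to_grid_py (rows : List (Int × List (Int × String))) : List (List String) :=
  let d := PySem.Dict.mk rows
  if rows.isEmpty then []
  else
    let sortedRowIndices := PySem.List.sorted (PySem.Dict.keys d) (fun x => x)
    let maxCols := PySem.List.maxD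
      ((PySem.Dict.values d).map
        (fun row => PySem.List.maxD (PySem.Dict.keys (PySem.Dict.mk row)) (fun x => x) 0))
      (fun x => x) 0
    if maxCols = 0 then []
    else
      sortedRowIndices.foldl
        (fun grid rowIdx =>
          let rowData := PySem.Dict.getD d rowIdx []
          grid ++ [(PySem.List.pyRange 1 (maxCols + 1)).map
                     (fun c => PySem.Dict.getD (PySem.Dict.mk rowData) c "")])
        []

-- ===== PORT B =====
-- _row_width(row): max(row, default=0) iterates the dict's (distinct) keys
def pvRowWidth (row : List (Int × String)) : Int :=
  PySem.List.maxD (PySem.Dict.keys (PySem.Dict.mk row)) (fun x => x) 0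

-- _scatter_row(row, max_cols): out = [""] * max_cols (negative gives []); then
-- for (c, v) in row.items(): if 1 <= c <= max_cols: out[c-1] = v.  Under Pre_ the
-- association list IS the dict's items list (no duplicate inner keys), so the fold
-- over `row` is exact.
def pvScatterRow (row : List (Int × String)) (maxCols : Int) : List String :=
  row.foldl
    (fun out cv => if 1 ≤ cv.1 ∧ cv.1 ≤ maxCols then out.set (cv.1 - 1).toNat cv.2 else out)
    (List.replicate maxCols.toNat "")

def rows_to_grid_py_alt (rows : List (Int × List (Int × String))) : List (List String) :=
  let items := PySem.List.sorted (PySem.Dict.mk rows).items (fun kv => kv.1)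
  if items.isEmpty then []
  else
    -- max(...) over a nonempty generator; maxD's default 0 never fires here
    let maxCols := PySem.List.maxD (items.map (fun kv => pvRowWidth kv.2)) (fun x => x) 0
    if maxCols = 0 then []
    else items.map (fun kv => pvScatterRow kv.2 maxCols)

-- ===== PRECONDITION & SPEC =====
-- Pre_ admits exactly the association lists that represent Python dicts: a list with
-- duplicate keys (at either level) cannot arise from the argument dict[int, dict[int, str]].
def Pre_rows_to_grid_py (rows : List (Int × List (Int × String))) : Prop :=
  (rows.map Prod.fst).Nodup ∧ ∀ p ∈ rows, (p.2.map Prod.fst).Nodup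
instance (rows : List (Int × List (Int × String))) : Decidable (Pre_rows_to_grid_py rows) := by unfold Pre_rows_to_grid_py; infer_instance

def pvWitness_rows_to_grid_py : (List (Int × List (Int × String))) := [(2, [(1, "b")]), (1, [(2, "a"), (1, "x")])]

def Spec_rows_to_grid_py (rows : List (Int × List (Int × String))) (out : List (List String)) : Prop := out = rows_to_grid_py_alt rows
instance (rows : List (Int × List (Int × String))) (out : List (List String)) : Decidable (Spec_rows_to_grid_py rows out) := by unfold Spec_rows_to_grid_py; infer_instance

-- ===== CLAIM (what is proved, stated in full; the proofs are below) =====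
def Claim_equal_rows_to_grid_py : Prop := ∀ (rows : List (Int × List (Int × String))), Dom_rows_to_grid_py rows → Pre_rows_to_grid_py rows → Spec_rows_to_grid_py rows (rows_to_grid_py rows)

-- ===== LEMMAS AND PROOFS =====

-- max(xs, default=d) with no key depends only on the multiset of values
theorem pv_maxD_id_perm (xs ys : List Int) (h : xs.Perm ys) (d : Int) :
    PySem.List.maxD xs (fun x => x) d = PySem.List.maxD ys (fun x => x) d := by
  unfold PySem.List.maxD
  cases hx : PySem.List.max? xs (fun x => x) with
  | none =>
    rw [PySem.List.max?_eq_none_iff] at hx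
    subst hx
    have : ys = [] := h.nil_eq.symm
    subst this
    rfl
  | some m =>
    cases hy : PySem.List.max? ys (fun x => x) with
    | none =>
      rw [PySem.List.max?_eq_none_iff] at hy
      subst hy
      have hxs : xs = [] := h.eq_nil
      subst hxs
      rw [show PySem.List.max? ([] : List Int) (fun x => x) = none from rfl] at hx
      exact absurd hx.symm (Option.some_ne_none m)
    | some m' =>
      have hmx := PySem.List.max?_mem hx
      have hmy := PySem.List.max?_mem hy
      have h1 : m ≤ m' := PySem.List.max?_isMax hy m (h.mem_iff.mp hmx)
      have h2 : m' ≤ m := PySem.List.max?_isMax hx m' (h.mem_iff.mpr hmy)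
      rw [le_antisymm h1 h2]

-- sorting the items by key is sorting the keys and pairing each with its value
theorem pv_sorted_items (rows : List (Int × List (Int × String)))
    (hnd : (rows.map Prod.fst).Nodup) :
    PySem.List.sorted rows (fun kv => kv.1) =
    (PySem.List.sorted (rows.map Prod.fst) (fun x => x)).map
      (fun k => (k, PySem.Dict.getD (PySem.Dict.mk rows) k [])) := by
  refine PySem.List.sorted_eq_of_perm_of_pairwise_lt rows _ (fun kv => kv.1) ?_ ?_
  · have h1 : (PySem.List.sorted (rows.map Prod.fst) (fun x => x)).Perm (rows.map Prod.fst) :=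
      PySem.List.sorted_perm _ _ _
    have h2 := h1.map (fun k => (k, PySem.Dict.getD (PySem.Dict.mk rows) k []))
    refine h2.trans ?_
    have := PySem.Dict.items_eq_map_keys (PySem.Dict.mk rows) (by exact hnd) []
    -- items = rows and keys = rows.map Prod.fst definitionally
    exact this.symm ▸ List.Perm.refl rows
  · have hp : (PySem.List.sorted (rows.map Prod.fst) (fun x => x)).Pairwise (· ≤ ·) :=
      PySem.List.sorted_pairwise _ _
    have hnd' : (PySem.List.sorted (rows.map Prod.fst) (fun x => x)).Nodup :=
      (PySem.List.sorted_perm _ _ _).nodup_iff.mpr hnd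
    have hlt : (PySem.List.sorted (rows.map Prod.fst) (fun x => x)).Pairwise (· < ·) := by
      refine (hp.and hnd').imp ?_
      rintro a b ⟨hle, hne⟩
      exact lt_of_le_of_ne hle hne
    exact List.pairwise_map.mpr (hlt.imp (fun h => h))

-- the scatter fold preserves the row length
theorem pv_scatter_length (N : Int) (items : List (Int × String)) (row : List String) :
    (items.foldl
      (fun row cv => if 1 ≤ cv.1 ∧ cv.1 ≤ N then row.set (cv.1 - 1).toNat cv.2 else row)
      row).length = row.length := by
  induction items generalizing row with
  | nil => rfl
  | cons p t ih =>
    simp only [List.foldl_cons]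
    split_ifs with h
    · rw [ih]; simp
    · exact ih row

-- first-match lookup on a literal Dict is List.find?
theorem pv_get?_mk_eq_find? (items : List (Int × String)) (c : Int) :
    (PySem.Dict.mk items).get? c = (items.find? (fun p => p.1 == c)).map Prod.snd := by
  induction items with
  | nil => rfl
  | cons p t ih =>
    rw [PySem.Dict.get?_mk_cons]
    cases hpc : (p.1 == c) <;> simp [List.find?, hpc, ih]

-- cell j of the scattered row is the first matching stored value (keys Nodup)
theorem pv_scatter_get? (N : Int) (items : List (Int × String))
    (h : (items.map Prod.fst).Nodup) (row : List String) (hlen : row.length = N.toNat)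
    (j : Nat) (hj : j < N.toNat) :
    (items.foldl
      (fun row cv => if 1 ≤ cv.1 ∧ cv.1 ≤ N then row.set (cv.1 - 1).toNat cv.2 else row)
      row)[j]? =
    (match items.find? (fun p => p.1 == (j : Int) + 1) with
     | some cv => some cv.2
     | none => row[j]?) := by
  induction items generalizing row with
  | nil => rfl
  | cons p t ih =>
    simp only [List.map_cons, List.nodup_cons, List.mem_map] at h
    obtain ⟨hpf, hnd⟩ := h
    simp only [List.foldl_cons, List.find?]
    by_cases hc : p.1 = (j : Int) + 1
    · have hg : 1 ≤ p.1 ∧ p.1 ≤ N := by omega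
      rw [if_pos hg]
      have hlen' : (row.set (p.1 - 1).toNat p.2).length = N.toNat := by
        simpa using hlen
      rw [ih hnd _ hlen']
      have hnone : t.find? (fun q => q.1 == (j : Int) + 1) = none := by
        cases hf : t.find? (fun q => q.1 == (j : Int) + 1) with
        | none => rfl
        | some cv =>
          have h1 := List.mem_of_find?_eq_some hf
          have h2 := List.find?_some hf
          simp only [beq_iff_eq] at h2
          exact absurd ⟨cv, h1, by omega⟩ hpf
      rw [hnone]
      have hj' : (p.1 - 1).toNat = j := by omega
      have : (p.1 == (j : Int) + 1) = true := by simpa using hc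
      simp only [this, hj']
      exact List.getElem?_set_self (by omega)
    · have hfc : (p.1 == (j : Int) + 1) = false := by simpa using hc
      rw [hfc]
      by_cases hg : 1 ≤ p.1 ∧ p.1 ≤ N
      · rw [if_pos hg]
        have hlen' : (row.set (p.1 - 1).toNat p.2).length = N.toNat := by simpa using hlen
        rw [ih hnd _ hlen']
        cases hf : t.find? (fun q => q.1 == (j : Int) + 1) with
        | some cv => rfl
        | none =>
          simp only []
          exact List.getElem?_set_ne (by omega)
      · rw [if_neg hg]
        exact ih hnd _ hlen

-- B's scattered row equals A's comprehension row (inner keys Nodup)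
theorem pv_row_eq (N : Int) (items : List (Int × String)) (h : (items.map Prod.fst).Nodup) :
    pvScatterRow items N =
    (PySem.List.pyRange 1 (N + 1)).map (fun c => PySem.Dict.getD (PySem.Dict.mk items) c "") := by
  unfold pvScatterRow
  apply List.ext_getElem?
  intro i
  have hlenL : (items.foldl
      (fun row cv => if 1 ≤ cv.1 ∧ cv.1 ≤ N then row.set (cv.1 - 1).toNat cv.2 else row)
      (List.replicate N.toNat "")).length = N.toNat := by
    rw [pv_scatter_length]; simp
  have hlenR : ((PySem.List.pyRange 1 (N + 1)).map
      (fun c => PySem.Dict.getD (PySem.Dict.mk items) c "")).length = N.toNat := by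
    simp [PySem.List.length_pyRange_one]
  by_cases hi : i < N.toNat
  · rw [pv_scatter_get? N items h _ (by simp) i hi]
    rw [List.getElem?_map]
    rw [PySem.List.getElem?_pyRange_one]
    rw [if_pos (by omega : i < (N + 1 - 1).toNat)]
    have h1i : (1:Int) + (i:Int) = (i:Int) + 1 := by omega
    rw [h1i, Option.map_some]
    rw [PySem.Dict.getD_eq_get?_getD, pv_get?_mk_eq_find?]
    cases hf : items.find? (fun p => p.1 == (i:Int) + 1) with
    | some cv => simp
    | none => simp [hi]
  · rw [List.getElem?_eq_none (by omega), List.getElem?_eq_none (by omega)]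

-- ===== VERDICT (by name: the statement is the Claim_ definition above) =====
theorem rows_to_grid_py_spec : Claim_equal_rows_to_grid_py := by
  intro rows _ hpre
  unfold Spec_rows_to_grid_py rows_to_grid_py rows_to_grid_py_alt
  simp only []
  by_cases he : rows.isEmpty
  · have : rows = [] := by simpa using he
    subst this
    rfl
  · have hne : rows ≠ [] := by simpa using he
    have hitems : (PySem.Dict.mk rows).items = rows := rfl
    have hkeys : PySem.Dict.keys (PySem.Dict.mk rows) = rows.map Prod.fst := rfl
    have hvals : PySem.Dict.values (PySem.Dict.mk rows) = rows.map Prod.snd := rfl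
    -- B's empty test is false
    have hbne : (PySem.List.sorted (PySem.Dict.mk rows).items (fun kv => kv.1)).isEmpty = false := by
      rw [List.isEmpty_eq_false_iff, Ne, PySem.List.sorted_eq_nil_iff, hitems]
      exact hne
    have heF : rows.isEmpty = false := by simpa using he
    simp only [heF, hbne, Bool.false_eq_true, if_false]
    -- the two maxCols agree
    have hsi := pv_sorted_items rows hpre.1
    have hmax :
        PySem.List.maxD
          ((PySem.List.sorted (PySem.Dict.mk rows).items (fun kv => kv.1)).map
            (fun kv => pvRowWidth kv.2)) (fun x => x) 0 =
        PySem.List.maxD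
          ((PySem.Dict.values (PySem.Dict.mk rows)).map
            (fun row => PySem.List.maxD (PySem.Dict.keys (PySem.Dict.mk row)) (fun x => x) 0))
          (fun x => x) 0 := by
      apply pv_maxD_id_perm
      have hperm : (PySem.List.sorted (PySem.Dict.mk rows).items (fun kv => kv.1)).Perm rows :=
        PySem.List.sorted_perm _ _ _
      have := hperm.map (fun kv => pvRowWidth kv.2)
      refine this.trans ?_
      rw [hvals, List.map_map]
      exact List.Perm.refl _
    rw [hmax]
    set maxCols := PySem.List.maxD
      ((PySem.Dict.values (PySem.Dict.mk rows)).map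
        (fun row => PySem.List.maxD (PySem.Dict.keys (PySem.Dict.mk row)) (fun x => x) 0))
      (fun x => x) 0 with hmc
    by_cases hz : maxCols = 0
    · simp [hz]
    · simp only [hz, if_false]
      rw [PySem.List.foldl_append_singleton_eq_map, List.nil_append]
      rw [hkeys, hsi, List.map_map]
      apply List.map_congr_left
      intro k _
      simp only [Function.comp]
      rw [PySem.Dict.getD_eq_get?_getD]
      refine (pv_row_eq maxCols _ ?_).symm
      cases hg : (PySem.Dict.mk rows).get? k with
      | none => simp
      | some r =>
        simp only [Option.getD_some]
        exact hpre.2 (k, r) (PySem.Dict.mem_items_of_get?_eq_some _ hg)
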